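-- pv_equiv track=rewrite | github.com/ikeohachidi/aoc | 2015/5/5.py | _contains_overlap
-- ===== SOURCE A (Python) =====
-- def _contains_overlap(input):
--     pairs = {}
--     for index in range(len(input) - 1):
--         pair = input[index:index + 2]
--
--         # Check if pair exists and is non-overlapping
--         if pair in pairs and pairs[pair] < index - 1:
--             return True
--
--         # Store the first occurrence of the pair
--         if pair not in pairs:
--             pairs[pair] = index
--     return False
-- ===== SOURCE B (Python) =====
-- def _contains_overlap(input):
--     n = len(input)
--     for i in range(n - 1):
--         pair = input[i:i + 2]
--         for j in range(i + 2, n - 1):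
--             if input[j:j + 2] == pair:
--                 return True
--     return False
-- ===== Notes on version B (the rewrite author's own statement) =====
-- stated objective: alternative
-- what changed: Replaced the first-occurrence dict with a nested slice-comparing scan: for each pair, rescan the rest of the string for a non-overlapping copy, building no table at all.
import Mathlib
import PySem

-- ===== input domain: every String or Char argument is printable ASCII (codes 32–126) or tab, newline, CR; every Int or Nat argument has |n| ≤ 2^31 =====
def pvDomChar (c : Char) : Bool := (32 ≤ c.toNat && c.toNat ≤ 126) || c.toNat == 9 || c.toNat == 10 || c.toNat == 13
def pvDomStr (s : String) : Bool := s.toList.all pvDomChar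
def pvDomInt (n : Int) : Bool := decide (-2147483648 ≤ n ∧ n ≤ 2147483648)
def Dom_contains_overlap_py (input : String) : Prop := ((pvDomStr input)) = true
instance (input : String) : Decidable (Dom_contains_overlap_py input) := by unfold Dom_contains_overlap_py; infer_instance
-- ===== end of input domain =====

-- B replaces A's first-occurrence dict with a plain nested rescan (alternative decomposition, same return value).

-- ===== PORT A =====
-- loop 'for index in range(len(input)-1)' with the first-occurrence dict and early return
def pvALoop (s : List Char) (idxs : List Int) (pairs : PySem.Dict (List Char) Int) : Bool :=
  match idxs with
  | [] => false
  | i :: rest =>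
    let pair := PySem.List.slice s (some i) (some (i + 2))
    match pairs.get? pair with
    | some v => if v < i - 1 then true else pvALoop s rest pairs
    | none => pvALoop s rest (pairs.insert pair i)

def contains_overlap_py (input : String) : Bool :=
  pvALoop input.toList (PySem.List.pyRange 0 ((input.toList.length : Int) - 1) 1) PySem.Dict.empty

-- ===== PORT B =====
-- inner loop 'for j in range(i+2, n-1)'
def pvBInner (s : List Char) (pair : List Char) (js : List Int) : Bool :=
  match js with
  | [] => false
  | j :: rest =>
    if PySem.List.slice s (some j) (some (j + 2)) == pair then true else pvBInner s pair rest

-- outer loop 'for i in range(n-1)'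
def pvBOuter (s : List Char) (idxs : List Int) : Bool :=
  match idxs with
  | [] => false
  | i :: rest =>
    if pvBInner s (PySem.List.slice s (some i) (some (i + 2)))
        (PySem.List.pyRange (i + 2) ((s.length : Int) - 1) 1) then true
    else pvBOuter s rest

def contains_overlap_py_alt (input : String) : Bool :=
  pvBOuter input.toList (PySem.List.pyRange 0 ((input.toList.length : Int) - 1) 1)

-- ===== PRECONDITION & SPEC =====
def Spec_contains_overlap_py (input : String) (out : Bool) : Prop := out = contains_overlap_py_alt input
instance (input : String) (out : Bool) : Decidable (Spec_contains_overlap_py input out) := by unfold Spec_contains_overlap_py; infer_instance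

-- ===== CLAIM (what is proved, stated in full; the proofs are below) =====
def Claim_equal_contains_overlap_py : Prop := ∀ (input : String), Dom_contains_overlap_py input → Spec_contains_overlap_py input (contains_overlap_py input)

-- ===== LEMMAS AND PROOFS =====

-- the pair starting at natural index k
def pairAt (s : List Char) (k : Nat) : List Char := (s.drop k).take 2

-- "some non-overlapping repeat (k, i) with i still unprocessed (m ≤ i)"
def ExRep (s : List Char) (m : Nat) : Prop :=
  ∃ i k : Nat, m ≤ i ∧ i + 2 ≤ s.length ∧ k + 2 ≤ i ∧ pairAt s k = pairAt s i

-- dict invariant: get? p = some v  ↔  v is the first index < m whose pair is p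
def pvInv (s : List Char) (m : Nat) (pairs : PySem.Dict (List Char) Int) : Prop :=
  (∀ p, pairs.get? p = none ↔ ∀ k : Nat, k < m → pairAt s k ≠ p) ∧
  (∀ p v, pairs.get? p = some v →
    ∃ kv : Nat, v = (kv : Int) ∧ kv < m ∧ pairAt s kv = p ∧ ∀ k : Nat, k < kv → pairAt s k ≠ p)

theorem slice_pairAt (s : List Char) (k : Nat) :
    PySem.List.slice s (some (k : Int)) (some ((k : Int) + 2)) = pairAt s k := by
  have : ((k : Int) + 2) = ((k : Int) + ((2 : Nat) : Int)) := by push_cast; ring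
  rw [this, PySem.List.slice_natCast_add]; rfl

-- splitting the repeat-existence predicate at the next index m
theorem exRep_succ (s : List Char) (m : Nat) :
    ExRep s m ↔ ExRep s (m + 1) ∨ (m + 2 ≤ s.length ∧ ∃ k, k + 2 ≤ m ∧ pairAt s k = pairAt s m) := by
  constructor
  · rintro ⟨i, k, h1, h2, h3, h4⟩
    by_cases hi : i = m
    · subst hi; right; exact ⟨h2, k, h3, h4⟩
    · left; exact ⟨i, k, by omega, h2, h3, h4⟩
  · rintro (⟨i, k, h1, h2, h3, h4⟩ | ⟨h2, k, h3, h4⟩)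
    · exact ⟨i, k, by omega, h2, h3, h4⟩
    · exact ⟨m, k, le_refl _, h2, h3, h4⟩

theorem lemA (s : List Char) :
    ∀ (idxs : List Int) (m : Nat) (pairs : PySem.Dict (List Char) Int),
      idxs = PySem.List.pyRange (m : Int) ((s.length : Int) - 1) 1 →
      pvInv s m pairs →
      (pvALoop s idxs pairs = true ↔ ExRep s m) := by
  intro idxs
  induction idxs with
  | nil =>
    intro m pairs h _
    have hlen := congrArg List.length h
    rw [PySem.List.length_pyRange_one] at hlen
    simp only [List.length_nil] at hlen
    constructor
    · intro hc; simp [pvALoop] at hc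
    · rintro ⟨i, k, h1, h2, h3, h4⟩; exfalso; omega
  | cons i0 rest ih =>
    intro m pairs h hinv
    have hm : (m : Int) < (s.length : Int) - 1 := by
      by_contra hc
      rw [PySem.List.pyRange_one_eq_nil (by omega)] at h
      exact List.cons_ne_nil _ _ h
    rw [PySem.List.pyRange_one_cons hm] at h
    injection h with h1 h2
    subst h1
    have hn : m + 2 <= s.length := by omega
    simp only [pvALoop, slice_pairAt]
    rcases hg : pairs.get? (pairAt s m) with _ | v
    · -- pair not yet seen: insert and continue
      have hnone := (hinv.1 (pairAt s m)).mp hg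
      have hinv' : pvInv s (m + 1) (pairs.insert (pairAt s m) (m : Int)) := by
        constructor
        · intro p
          rw [PySem.Dict.get?_insert]
          by_cases hp : p = pairAt s m
          · subst hp
            constructor
            · intro hc; exact absurd hc (by simp)
            · intro hall; exact absurd rfl (hall m (by omega))
          · rw [if_neg hp]
            constructor
            · intro hnn k hk
              rcases Nat.lt_succ_iff_lt_or_eq.mp hk with h' | h'
              · exact (hinv.1 p).mp hnn k h'
              · subst h'; intro hpe; exact hp hpe.symm
            · intro hall; exact (hinv.1 p).mpr (fun k hk => hall k (by omega))
        · intro p w hw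
          rw [PySem.Dict.get?_insert] at hw
          by_cases hp : p = pairAt s m
          · rw [if_pos hp] at hw
            refine ⟨m, by injection hw.symm, by omega, hp.symm, fun k hk => ?_⟩
            intro hpe; rw [hp] at hpe; exact hnone k hk hpe
          · rw [if_neg hp] at hw
            obtain ⟨kw, a, b, c, d⟩ := hinv.2 p w hw
            exact ⟨kw, a, by omega, c, d⟩
      rw [ih (m + 1) _ (by rw [Nat.cast_add, Nat.cast_one]; exact h2) hinv']
      rw [exRep_succ s m]
      constructor
      · exact Or.inl
      · rintro (he | ⟨_, k, h3, h4⟩)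
        · exact he
        · exact absurd h4 (hnone k (by omega))
    · -- pair seen before at first occurrence kv
      obtain ⟨kv, hv, hkm, hpk, hmin⟩ := hinv.2 _ _ hg
      subst hv
      show (if (kv : Int) < (m : Int) - 1 then true else pvALoop s rest pairs) = true ↔ ExRep s m
      split_ifs with hlt
      · refine iff_of_true rfl ⟨m, kv, le_refl _, hn, by omega, by rw [hpk]⟩
      · have hinv' : pvInv s (m + 1) pairs := by
          constructor
          · intro p
            constructor
            · intro hnn k hk
              rcases Nat.lt_succ_iff_lt_or_eq.mp hk with h' | h'
              · exact (hinv.1 p).mp hnn k h'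
              · subst h'; intro hpe; rw [← hpe] at hnn; rw [hnn] at hg; exact absurd hg (by simp)
            · intro hall; exact (hinv.1 p).mpr (fun k hk => hall k (by omega))
          · intro p w hw
            obtain ⟨kw, a, b, c, d⟩ := hinv.2 p w hw
            exact ⟨kw, a, by omega, c, d⟩
        rw [ih (m + 1) pairs (by rw [Nat.cast_add, Nat.cast_one]; exact h2) hinv']
        rw [exRep_succ s m]
        constructor
        · exact Or.inl
        · rintro (he | ⟨_, k, h3, h4⟩)
          · exact he
          · exact absurd h4 (by
              have hk : k < kv := by omega
              intro hc; rw [← hpk] at hc; exact hmin k hk (hc.trans hpk))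

theorem lemBInner (s : List Char) (pair : List Char) :
    ∀ js : List Int, (pvBInner s pair js = true ↔ ∃ j ∈ js, PySem.List.slice s (some j) (some (j + 2)) = pair) := by
  intro js
  induction js with
  | nil => simp [pvBInner]
  | cons j rest ih =>
    simp only [pvBInner]
    by_cases h : PySem.List.slice s (some j) (some (j + 2)) = pair
    · simp [h]
    · simp [h, ih]

theorem lemBOuter (s : List Char) :
    ∀ idxs : List Int,
      (pvBOuter s idxs = true ↔ ∃ i ∈ idxs,
        pvBInner s (PySem.List.slice s (some i) (some (i + 2)))
          (PySem.List.pyRange (i + 2) ((s.length : Int) - 1) 1) = true) := by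
  intro idxs
  induction idxs with
  | nil => simp [pvBOuter]
  | cons i rest ih =>
    simp only [pvBOuter]
    by_cases h : pvBInner s (PySem.List.slice s (some i) (some (i + 2)))
        (PySem.List.pyRange (i + 2) ((s.length : Int) - 1) 1) = true
    · simp [h]
    · simp [h, ih]

theorem lemB (s : List Char) :
    (pvBOuter s (PySem.List.pyRange 0 ((s.length : Int) - 1) 1) = true ↔ ExRep s 0) := by
  rw [lemBOuter]
  constructor
  · rintro ⟨i, hi, hInner⟩
    rw [lemBInner] at hInner
    obtain ⟨j, hj, hsl⟩ := hInner
    rw [PySem.List.mem_pyRange_one] at hi hj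
    obtain ⟨hi0, hi1⟩ := hi
    obtain ⟨hj0, hj1⟩ := hj
    have hci : ((i.toNat : Nat) : Int) = i := Int.toNat_of_nonneg hi0
    have hcj : ((j.toNat : Nat) : Int) = j := Int.toNat_of_nonneg (by omega)
    rw [← hci, ← hcj, slice_pairAt, slice_pairAt] at hsl
    exact ⟨j.toNat, i.toNat, Nat.zero_le _, by omega, by omega, hsl.symm⟩
  · rintro ⟨i, k, _, h2, h3, h4⟩
    refine ⟨(k : Int), ?_, ?_⟩
    · rw [PySem.List.mem_pyRange_one]
      constructor
      · omega
      · omega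
    · rw [lemBInner]
      refine ⟨(i : Int), ?_, ?_⟩
      · rw [PySem.List.mem_pyRange_one]
        constructor
        · omega
        · omega
      · rw [slice_pairAt, slice_pairAt]; exact h4.symm

-- ===== VERDICT (by name: the statement is the Claim_ definition above) =====
theorem contains_overlap_py_spec : Claim_equal_contains_overlap_py := by
  intro input _
  unfold Spec_contains_overlap_py contains_overlap_py contains_overlap_py_alt
  set s := input.toList
  have hA := lemA s (PySem.List.pyRange 0 ((s.length : Int) - 1) 1) 0 PySem.Dict.empty
    (by norm_num) (by
      constructor
      · intro p; simp [PySem.Dict.get?_empty]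
      · intro p v h; simp [PySem.Dict.get?_empty] at h)
  have hB := lemB s
  rw [Bool.eq_iff_iff, hA, hB]
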